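-- pv_equiv track=rewrite | github.com/thompson1224/upbt_trader | backend/apps/gateway/api/v1/settings.py | _diff_excluded_market_items
-- ===== SOURCE A (Python) =====
-- from typing import Dict, List, Optional, Union
--
-- def _diff_excluded_market_items(
--     previous: List[Dict[str, str]],
--     current: List[Dict[str, str]],
-- ) -> Dict[str, List[Dict[str, str]]]:
--     previous_map = {item["market"]: item for item in previous}
--     current_map = {item["market"]: item for item in current}
--
--     added = [current_map[market] for market in sorted(current_map.keys() - previous_map.keys())]
--     removed = [previous_map[market] for market in sorted(previous_map.keys() - current_map.keys())]
--     reason_changed: List[Dict[str, str]] = []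
--
--     for market in sorted(previous_map.keys() & current_map.keys()):
--         previous_reason = previous_map[market].get("reason", "")
--         current_reason = current_map[market].get("reason", "")
--         if previous_reason != current_reason:
--             reason_changed.append(
--                 {
--                     "market": market,
--                     "previous_reason": previous_reason,
--                     "reason": current_reason,
--                     "updated_at": current_map[market].get("updated_at", ""),
--                 }
--             )
--
--     return {
--         "added": added,
--         "removed": removed,
--         "reason_changed": reason_changed,
--     }
-- ===== SOURCE B (Python) =====
-- def _diff_excluded_market_items(previous, current):
--     # Sort-merge join: dedup each list to (market, item) pairs keeping the last
--     # occurrence per market, sort both by market, then advance two pointers.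
--     def dedup_sorted(items):
--         seen = set()
--         out = []
--         for item in reversed(items):
--             m = item["market"]
--             if m not in seen:
--                 seen.add(m)
--                 out.append((m, item))
--         out.sort(key=lambda t: t[0])
--         return out
--
--     prev = dedup_sorted(previous)
--     cur = dedup_sorted(current)
--     added, removed, reason_changed = [], [], []
--     i = j = 0
--     while i < len(prev) or j < len(cur):
--         if j >= len(cur) or (i < len(prev) and prev[i][0] < cur[j][0]):
--             removed.append(prev[i][1])
--             i += 1
--         elif i >= len(prev) or cur[j][0] < prev[i][0]:
--             added.append(cur[j][1])
--             j += 1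
--         else:
--             m, p = prev[i]
--             c = cur[j][1]
--             pr = p.get("reason", "")
--             cr = c.get("reason", "")
--             if pr != cr:
--                 reason_changed.append({
--                     "market": m,
--                     "previous_reason": pr,
--                     "reason": cr,
--                     "updated_at": c.get("updated_at", ""),
--                 })
--             i += 1
--             j += 1
--     return {"added": added, "removed": removed, "reason_changed": reason_changed}
-- ===== Notes on version B (the rewrite author's own statement) =====
-- stated objective: alternative
-- what changed: Replaces A's hash-map key-set algebra (two dict comprehensions, set difference/intersection, three sorted passes with dict lookups) by a sort-merge join: each list is deduplicated into (market,item) pairs keeping the last occurrence, both pair lists are sorted once, and a single two-pointer merge classifies every market into added/removed/reason_changed with no lookups.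
import Mathlib
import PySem

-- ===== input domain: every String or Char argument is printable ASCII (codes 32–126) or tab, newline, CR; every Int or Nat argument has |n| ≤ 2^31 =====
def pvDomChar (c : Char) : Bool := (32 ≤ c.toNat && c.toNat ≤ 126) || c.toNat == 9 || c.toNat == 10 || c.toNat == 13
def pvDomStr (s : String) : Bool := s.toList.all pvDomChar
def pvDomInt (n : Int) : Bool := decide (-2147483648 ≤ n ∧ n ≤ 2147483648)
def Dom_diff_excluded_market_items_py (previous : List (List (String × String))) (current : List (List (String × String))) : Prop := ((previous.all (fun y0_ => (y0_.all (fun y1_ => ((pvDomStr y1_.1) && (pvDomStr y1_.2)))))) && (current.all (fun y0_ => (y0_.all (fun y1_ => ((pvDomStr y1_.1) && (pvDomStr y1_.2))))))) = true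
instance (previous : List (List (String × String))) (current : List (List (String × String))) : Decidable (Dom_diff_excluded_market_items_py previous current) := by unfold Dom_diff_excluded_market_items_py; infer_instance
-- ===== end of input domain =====

-- B replaces A's hash-map key-set algebra by a sort-merge join (dedup each side keeping the
-- last item per market, sort the pair lists, two-pointer merge); same return value on Pre_.

-- ===== PORT A =====
-- item["market"]: Python raises KeyError when the key is missing; Pre_ excludes that, so the
-- `.getD ""` default is never reached on admitted inputs.
def pvItemMarket (item : List (String × String)) : String :=
  ((PySem.Dict.mk item).get? "market").getD ""

-- {item["market"]: item for item in items}
def pvMarketMap (items : List (List (String × String))) : PySem.Dict String (List (String × String)) :=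
  items.foldl (fun d item => d.insert (pvItemMarket item) item) PySem.Dict.empty

def diff_excluded_market_items_py (previous : List (List (String × String))) (current : List (List (String × String))) : List (String × List (List (String × String))) :=
  let previousMap := pvMarketMap previous
  let currentMap := pvMarketMap current
  let added := (PySem.List.sorted (PySem.Set.diff currentMap.keys previousMap.keys) (fun x => x) false).map
      (fun market => currentMap.getD market [])
  let removed := (PySem.List.sorted (PySem.Set.diff previousMap.keys currentMap.keys) (fun x => x) false).map
      (fun market => previousMap.getD market [])
  let reasonChanged := (PySem.List.sorted (PySem.Set.inter previousMap.keys currentMap.keys) (fun x => x) false).foldl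
      (fun acc market =>
        let previousReason := (PySem.Dict.mk (previousMap.getD market [])).getD "reason" ""
        let currentReason := (PySem.Dict.mk (currentMap.getD market [])).getD "reason" ""
        if previousReason ≠ currentReason then
          acc ++ [[("market", market), ("previous_reason", previousReason), ("reason", currentReason),
                   ("updated_at", (PySem.Dict.mk (currentMap.getD market [])).getD "updated_at" "")]]
        else acc) []
  [("added", added), ("removed", removed), ("reason_changed", reasonChanged)]

-- ===== PORT B =====
-- dedup_sorted: scan reversed(items) with a seen-set keeping the last occurrence per market,
-- then sort the (market, item) pairs by market
def pvDedupSorted (items : List (List (String × String))) : List (String × List (String × String)) :=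
  let st := items.reverse.foldl
    (fun (st : PySem.Set String × List (String × List (String × String))) item =>
      let m := pvItemMarket item
      if PySem.Set.contains st.1 m then st else (PySem.Set.add st.1 m, st.2 ++ [(m, item)]))
    (PySem.Set.empty, [])
  PySem.List.sorted st.2 (fun t => t.1) false

-- the two-pointer while loop, as structural recursion on the two (sorted) pair lists
def pvMergeLoop (prev cur : List (String × List (String × String)))
    (acc : List (List (String × String)) × List (List (String × String)) × List (List (String × String))) :
    List (List (String × String)) × List (List (String × String)) × List (List (String × String)) :=
  match prev, cur with
  | [], [] => acc
  | (_, p) :: ps, [] => pvMergeLoop ps [] (acc.1, acc.2.1 ++ [p], acc.2.2)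
  | [], (_, c) :: cs => pvMergeLoop [] cs (acc.1 ++ [c], acc.2.1, acc.2.2)
  | (mp, p) :: ps, (mc, c) :: cs =>
    if mp < mc then pvMergeLoop ps ((mc, c) :: cs) (acc.1, acc.2.1 ++ [p], acc.2.2)
    else if mc < mp then pvMergeLoop ((mp, p) :: ps) cs (acc.1 ++ [c], acc.2.1, acc.2.2)
    else
      let pr := (PySem.Dict.mk p).getD "reason" ""
      let cr := (PySem.Dict.mk c).getD "reason" ""
      pvMergeLoop ps cs
        (if pr ≠ cr then
          (acc.1, acc.2.1, acc.2.2 ++ [[("market", mp), ("previous_reason", pr), ("reason", cr),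
                                        ("updated_at", (PySem.Dict.mk c).getD "updated_at" "")]])
         else acc)
  termination_by prev.length + cur.length

def diff_excluded_market_items_py_alt (previous : List (List (String × String))) (current : List (List (String × String))) : List (String × List (List (String × String))) :=
  let prev := pvDedupSorted previous
  let cur := pvDedupSorted current
  let r := pvMergeLoop prev cur ([], [], [])
  [("added", r.1), ("removed", r.2.1), ("reason_changed", r.2.2)]

-- ===== PRECONDITION & SPEC =====
-- Pre_ excludes exactly the inputs where some item lacks the "market" key: there Python A raises KeyError.
def Pre_diff_excluded_market_items_py (previous : List (List (String × String))) (current : List (List (String × String))) : Prop :=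
  (previous.all (fun item => (PySem.Dict.mk item).contains "market") &&
   current.all (fun item => (PySem.Dict.mk item).contains "market")) = true
instance (previous : List (List (String × String))) (current : List (List (String × String))) : Decidable (Pre_diff_excluded_market_items_py previous current) := by unfold Pre_diff_excluded_market_items_py; infer_instance

def pvWitness_diff_excluded_market_items_py : (List (List (String × String))) × (List (List (String × String))) :=
  ([[("market", "KRW-BTC"), ("reason", "warn")], [("market", "KRW-ETH")]],
   [[("market", "KRW-BTC"), ("reason", "caution"), ("updated_at", "t1")], [("market", "KRW-XRP")]])

def Spec_diff_excluded_market_items_py (previous : List (List (String × String))) (current : List (List (String × String))) (out : List (String × List (List (String × String)))) : Prop := out = diff_excluded_market_items_py_alt previous current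
instance (previous : List (List (String × String))) (current : List (List (String × String))) (out : List (String × List (List (String × String)))) : Decidable (Spec_diff_excluded_market_items_py previous current out) := by unfold Spec_diff_excluded_market_items_py; infer_instance

-- ===== CLAIM (what is proved, stated in full; the proofs are below) =====
def Claim_equal_diff_excluded_market_items_py : Prop := ∀ (previous : List (List (String × String))) (current : List (List (String × String))), Dom_diff_excluded_market_items_py previous current → Pre_diff_excluded_market_items_py previous current → Spec_diff_excluded_market_items_py previous current (diff_excluded_market_items_py previous current)

-- ===== LEMMAS AND PROOFS =====

-- A's map lookup is "last item with that market": get? = find? on the reversed list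
theorem get?_foldl_insert_key (l : List (List (String × String))) (d : PySem.Dict String (List (String × String))) (m : String) :
    (l.foldl (fun d item => d.insert (pvItemMarket item) item) d).get? m
      = (l.reverse.find? (fun it => pvItemMarket it == m)).or (d.get? m) := by
  induction l generalizing d with
  | nil => simp
  | cons it rest ih =>
    simp only [List.foldl_cons, List.reverse_cons, List.find?_append, ih, Option.or_assoc]
    congr 1
    rcases h : List.find? (fun it => pvItemMarket it == m) [it] with _ | v
    · simp only [List.find?_singleton] at h
      rw [PySem.Dict.get?_insert]
      simp at h ⊢
      intro he; exact absurd he.symm h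
    · simp only [List.find?_singleton] at h
      split at h
      · rename_i hb
        simp at hb
        cases h
        simp [hb, PySem.Dict.get?_insert_self]
      · cases h

-- the dedup loop collects, per new key, the first matching item of the scanned list
theorem dedupLoop_spec (rl : List (List (String × String))) (s : PySem.Set String)
    (o : List (String × List (String × String)))
    (hinv : ∀ m, m ∈ s ↔ m ∈ o.map Prod.fst)
    (hnd : (o.map Prod.fst).Nodup) :
    ((rl.foldl (fun st item =>
        let m := pvItemMarket item
        if PySem.Set.contains st.1 m then st else (PySem.Set.add st.1 m, st.2 ++ [(m, item)])) (s, o)).2.map Prod.fst).Nodup ∧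
    (∀ m v, (m, v) ∈ (rl.foldl (fun st item =>
        let m := pvItemMarket item
        if PySem.Set.contains st.1 m then st else (PySem.Set.add st.1 m, st.2 ++ [(m, item)])) (s, o)).2 ↔
      (m, v) ∈ o ∨ (m ∉ s ∧ rl.find? (fun it => pvItemMarket it == m) = some v)) := by
  induction rl generalizing s o with
  | nil =>
    refine ⟨hnd, fun m v => ?_⟩
    simp
  | cons it rest ih =>
    by_cases hc : pvItemMarket it ∈ s
    · have hstep : ((it :: rest).foldl (fun st item =>
          let m := pvItemMarket item
          if PySem.Set.contains st.1 m then st else (PySem.Set.add st.1 m, st.2 ++ [(m, item)])) (s, o))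
          = (rest.foldl (fun st item =>
          let m := pvItemMarket item
          if PySem.Set.contains st.1 m then st else (PySem.Set.add st.1 m, st.2 ++ [(m, item)])) (s, o)) := by
        simp [hc]
      obtain ⟨h1, h2⟩ := ih s o hinv hnd
      rw [hstep]
      refine ⟨h1, fun m v => ?_⟩
      rw [h2 m v]
      rcases eq_or_ne (pvItemMarket it) m with he | hne
      · have : m ∈ s := he ▸ hc
        simp [this]
      · have hb : (pvItemMarket it == m) = false := by simpa using hne
        simp [hb]
    · have hknot : pvItemMarket it ∉ o.map Prod.fst := fun h => hc ((hinv _).mpr h)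
      have hstep : ((it :: rest).foldl (fun st item =>
          let m := pvItemMarket item
          if PySem.Set.contains st.1 m then st else (PySem.Set.add st.1 m, st.2 ++ [(m, item)])) (s, o))
          = (rest.foldl (fun st item =>
          let m := pvItemMarket item
          if PySem.Set.contains st.1 m then st else (PySem.Set.add st.1 m, st.2 ++ [(m, item)]))
            (PySem.Set.add s (pvItemMarket it), o ++ [(pvItemMarket it, it)])) := by
        simp [hc]
      have hinv' : ∀ m, m ∈ PySem.Set.add s (pvItemMarket it) ↔
          m ∈ (o ++ [(pvItemMarket it, it)]).map Prod.fst := by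
        intro m
        rw [PySem.Set.mem_add]
        simp only [List.map_append, List.mem_append, List.map_cons, List.map_nil,
          List.mem_singleton]
        constructor
        · rintro (h | rfl)
          · exact Or.inl ((hinv m).mp h)
          · exact Or.inr rfl
        · rintro (h | rfl)
          · exact Or.inl ((hinv m).mpr h)
          · exact Or.inr rfl
      have hnd' : ((o ++ [(pvItemMarket it, it)]).map Prod.fst).Nodup := by
        simp only [List.map_append]
        refine List.Nodup.append hnd (by simp) ?_
        intro x hx hy
        simp at hy
        exact hknot (hy ▸ hx)
      obtain ⟨h1, h2⟩ := ih (PySem.Set.add s (pvItemMarket it)) (o ++ [(pvItemMarket it, it)]) hinv' hnd'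
      rw [hstep]
      refine ⟨h1, fun m v => ?_⟩
      rw [h2 m v]
      rcases eq_or_ne (pvItemMarket it) m with he | hne
      · subst he
        have hnotin : ∀ v', (pvItemMarket it, v') ∉ o := by
          intro v' hmem
          exact hknot (List.mem_map_of_mem hmem)
        constructor
        · rintro (ho | ⟨hcc, _⟩)
          · rcases List.mem_append.mp ho with h | h
            · exact absurd h (hnotin v)
            · simp at h
              refine Or.inr ⟨hc, ?_⟩
              simp [h]
          · exact absurd ((PySem.Set.mem_add s _ _).mpr (Or.inr rfl)) hcc
        · rintro (ho | ⟨hcc, hf⟩)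
          · exact Or.inl (List.mem_append_left _ ho)
          · simp at hf
            exact Or.inl (List.mem_append_right _ (by simp [hf]))
      · have hb : (pvItemMarket it == m) = false := by simpa using hne
        have hf : List.find? (fun it' => pvItemMarket it' == m) (it :: rest)
            = List.find? (fun it' => pvItemMarket it' == m) rest := by
          simp [hb]
        have hmem : (m, v) ∈ o ++ [(pvItemMarket it, it)] ↔ (m, v) ∈ o := by
          constructor
          · intro h
            rcases List.mem_append.mp h with h | h
            · exact h
            · simp at h; exact absurd h.1 (Ne.symm hne)
          · exact List.mem_append_left _
        have hadd : m ∉ PySem.Set.add s (pvItemMarket it) ↔ m ∉ s := by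
          apply not_congr
          rw [PySem.Set.mem_add]
          constructor
          · rintro (h | rfl)
            · exact h
            · exact absurd rfl hne
          · exact Or.inl
        rw [hf, hmem, hadd]

theorem nodup_keys_marketMap (items : List (List (String × String))) : (pvMarketMap items).keys.Nodup := by
  unfold pvMarketMap
  exact PySem.Dict.nodup_keys_foldl_insert_key items pvItemMarket (fun _ item => item) PySem.Dict.empty
    (by simp [PySem.Dict.keys_empty])

theorem get?_marketMap_iff (items : List (List (String × String))) (m : String) (v : List (String × String)) :
    (pvMarketMap items).get? m = some v ↔
      items.reverse.find? (fun it => pvItemMarket it == m) = some v := by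
  unfold pvMarketMap
  rw [get?_foldl_insert_key]
  rcases h : items.reverse.find? (fun it => pvItemMarket it == m) with _ | w
  · simp [PySem.Dict.get?_empty]
  · simp [Option.or]

theorem get?_marketMap_keys_iff (items : List (List (String × String))) (m : String) (v : List (String × String)) :
    (pvMarketMap items).get? m = some v ↔
      m ∈ (pvMarketMap items).keys ∧ v = (pvMarketMap items).getD m [] := by
  constructor
  · intro h
    refine ⟨?_, ((PySem.Dict.getD_of_get?_eq_some _ _ h)).symm⟩
    by_contra hk
    rw [← PySem.Dict.get?_eq_none_iff_not_mem_keys] at hk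
    rw [h] at hk; cases hk
  · rintro ⟨hk, rfl⟩
    rcases hg : (pvMarketMap items).get? m with _ | w
    · exact absurd ((PySem.Dict.get?_eq_none_iff_not_mem_keys _ _).mp hg) (by simp [hk])
    · rw [PySem.Dict.getD_of_get?_eq_some _ _ hg]

theorem pairwise_lt_sorted_keys (items : List (List (String × String))) :
    (PySem.List.sorted (pvMarketMap items).keys (fun x => x) false).Pairwise (· < ·) := by
  have hle := PySem.List.sorted_pairwise (pvMarketMap items).keys (fun x => x)
  have hnd : (PySem.List.sorted (pvMarketMap items).keys (fun x => x) false).Nodup :=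
    (PySem.List.sorted_perm _ _ _).nodup_iff.mpr (nodup_keys_marketMap items)
  exact (hle.and hnd).imp (fun h => lt_of_le_of_ne h.1 h.2)

-- B's sorted deduped pair list IS A's map, laid out along its sorted key list
theorem dedupSorted_eq (items : List (List (String × String))) :
    pvDedupSorted items
      = (PySem.List.sorted (pvMarketMap items).keys (fun x => x) false).map
          (fun m => (m, (pvMarketMap items).getD m [])) := by
  obtain ⟨hnd, hmem⟩ := dedupLoop_spec items.reverse PySem.Set.empty []
    (by intro m; simp [PySem.Set.empty]) (by simp)
  have hkpnd : (PySem.List.sorted (pvMarketMap items).keys (fun x => x) false).Nodup :=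
    (PySem.List.sorted_perm _ _ _).nodup_iff.mpr (nodup_keys_marketMap items)
  have hmem' : ∀ m v, (m, v) ∈ (items.reverse.foldl
      (fun st item =>
        let m := pvItemMarket item
        if PySem.Set.contains st.1 m then st else (PySem.Set.add st.1 m, st.2 ++ [(m, item)]))
      (PySem.Set.empty, [])).2 ↔ (pvMarketMap items).get? m = some v := by
    intro m v
    rw [hmem m v, get?_marketMap_iff]
    simp [PySem.Set.empty]
  unfold pvDedupSorted
  apply PySem.List.sorted_eq_of_perm_of_pairwise_lt
  · rw [List.perm_ext_iff_of_nodup]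
    · rintro ⟨m, v⟩
      rw [List.mem_map]
      constructor
      · rintro ⟨a, ha, hav⟩
        have hm : a = m := congrArg Prod.fst hav
        subst hm
        have hv : (pvMarketMap items).getD a [] = v := congrArg Prod.snd hav
        apply (hmem' a v).mpr
        apply (get?_marketMap_keys_iff items a v).mpr
        exact ⟨(PySem.List.mem_sorted _ _ _ _).mp ha, hv.symm⟩
      · intro h
        obtain ⟨hk, hv⟩ := (get?_marketMap_keys_iff items m v).mp ((hmem' m v).mp h)
        exact ⟨m, by rw [PySem.List.mem_sorted]; exact hk, by rw [← hv]⟩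
    · exact hkpnd.map (fun a b hab => by simpa using congrArg Prod.fst hab)
    · exact List.Nodup.of_map _ hnd
  · exact List.Pairwise.map _ (fun a b hab => hab) (pairwise_lt_sorted_keys items)

-- the two-pointer merge of the two laid-out maps, characterised by filters over the key lists
theorem mergeLoop_spec (pm cm : PySem.Dict String (List (String × String))) :
    ∀ (n : Nat) (kp kc : List String)
      (acc : List (List (String × String)) × List (List (String × String)) × List (List (String × String))),
      kp.length + kc.length = n →
      kp.Pairwise (· < ·) → kc.Pairwise (· < ·) →
      pvMergeLoop (kp.map (fun m => (m, pm.getD m []))) (kc.map (fun m => (m, cm.getD m []))) acc =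
        (acc.1 ++ (kc.filter (fun m => !decide (m ∈ kp))).map (fun m => cm.getD m []),
         acc.2.1 ++ (kp.filter (fun m => !decide (m ∈ kc))).map (fun m => pm.getD m []),
         acc.2.2 ++ (kp.filter (fun m => decide (m ∈ kc))).flatMap (fun m =>
            if (PySem.Dict.mk (pm.getD m [])).getD "reason" "" ≠ (PySem.Dict.mk (cm.getD m [])).getD "reason" "" then
              [[("market", m), ("previous_reason", (PySem.Dict.mk (pm.getD m [])).getD "reason" ""),
                ("reason", (PySem.Dict.mk (cm.getD m [])).getD "reason" ""),
                ("updated_at", (PySem.Dict.mk (cm.getD m [])).getD "updated_at" "")]]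
            else [])) := by
  intro n
  induction n using Nat.strong_induction_on with
  | _ n ih =>
    intro kp kc acc hn hp hc
    match kp, kc with
    | [], [] => simp [pvMergeLoop]
    | [], mc :: kc' =>
      rw [show ([] : List String).map (fun m => (m, pm.getD m [])) = [] from rfl,
          List.map_cons, pvMergeLoop]
      have := ih (kc'.length) (by simp at hn; omega) [] kc' (acc.1 ++ [cm.getD mc []], acc.2.1, acc.2.2) (by simp) List.Pairwise.nil (List.Pairwise.of_cons hc)
      rw [List.map_nil] at this
      rw [this]
      simp
    | mp :: kp', [] =>
      rw [List.map_cons, show ([] : List String).map (fun m => (m, cm.getD m [])) = [] from rfl,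
          pvMergeLoop]
      have := ih (kp'.length) (by simp at hn; omega) kp' [] (acc.1, acc.2.1 ++ [pm.getD mp []], acc.2.2) (by simp) (List.Pairwise.of_cons hp) List.Pairwise.nil
      rw [List.map_nil] at this
      rw [this]
      simp
    | mp :: kp', mc :: kc' =>
      have hpall : ∀ x ∈ kp', mp < x := by
        intro x hx; exact (List.pairwise_cons.mp hp).1 x hx
      have hcall : ∀ x ∈ kc', mc < x := by
        intro x hx; exact (List.pairwise_cons.mp hc).1 x hx
      rw [List.map_cons, List.map_cons, pvMergeLoop]
      by_cases h1 : mp < mc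
      · rw [if_pos h1]
        rw [show ((mc, cm.getD mc []) :: List.map (fun m => (m, cm.getD m [])) kc') = List.map (fun m => (m, cm.getD m [])) (mc :: kc') from rfl]
        rw [ih (kp'.length + (mc :: kc').length) (by simp at hn ⊢; omega) kp' (mc :: kc') _ rfl
            (List.Pairwise.of_cons hp) hc]
        have e1 : (mc :: kc').filter (fun m => !decide (m ∈ mp :: kp'))
            = (mc :: kc').filter (fun m => !decide (m ∈ kp')) := by
          apply List.filter_congr
          intro x hx
          have : mp < x := by
            rcases List.mem_cons.mp hx with rfl | hx'
            · exact h1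
            · exact h1.trans (hcall x hx')
          simp [List.mem_cons, this.ne']
        have e2 : (mp :: kp').filter (fun m => !decide (m ∈ mc :: kc'))
            = mp :: kp'.filter (fun m => !decide (m ∈ mc :: kc')) := by
          rw [List.filter_cons]
          have : mp ∉ mc :: kc' := by
            intro hm
            rcases List.mem_cons.mp hm with rfl | hm'
            · exact absurd h1 (lt_irrefl _)
            · exact absurd (h1.trans (hcall _ hm')) (lt_irrefl _)
          simp [this]
        have e3 : (mp :: kp').filter (fun m => decide (m ∈ mc :: kc'))
            = kp'.filter (fun m => decide (m ∈ mc :: kc')) := by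
          rw [List.filter_cons]
          have : mp ∉ mc :: kc' := by
            intro hm
            rcases List.mem_cons.mp hm with rfl | hm'
            · exact absurd h1 (lt_irrefl _)
            · exact absurd (h1.trans (hcall _ hm')) (lt_irrefl _)
          simp [this]
        rw [e1, e2, e3]
        simp
      · by_cases h2 : mc < mp
        · rw [if_neg h1, if_pos h2]
          rw [show ((mp, pm.getD mp []) :: List.map (fun m => (m, pm.getD m [])) kp') = List.map (fun m => (m, pm.getD m [])) (mp :: kp') from rfl]
          rw [ih ((mp :: kp').length + kc'.length) (by simp at hn ⊢; omega) (mp :: kp') kc' _ rfl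
              hp (List.Pairwise.of_cons hc)]
          have hmc : mc ∉ mp :: kp' := by
            intro hm
            rcases List.mem_cons.mp hm with rfl | hm'
            · exact absurd h2 (lt_irrefl _)
            · exact absurd (h2.trans (hpall _ hm')) (lt_irrefl _)
          have e1 : (mc :: kc').filter (fun m => !decide (m ∈ mp :: kp'))
              = mc :: kc'.filter (fun m => !decide (m ∈ mp :: kp')) := by
            rw [List.filter_cons]; simp [hmc]
          have e2 : (mp :: kp').filter (fun m => !decide (m ∈ mc :: kc'))
              = (mp :: kp').filter (fun m => !decide (m ∈ kc')) := by
            apply List.filter_congr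
            intro x hx
            have : mc < x := by
              rcases List.mem_cons.mp hx with rfl | hx'
              · exact h2
              · exact h2.trans (hpall x hx')
            simp [List.mem_cons, this.ne']
          have e3 : (mp :: kp').filter (fun m => decide (m ∈ mc :: kc'))
              = (mp :: kp').filter (fun m => decide (m ∈ kc')) := by
            apply List.filter_congr
            intro x hx
            have : mc < x := by
              rcases List.mem_cons.mp hx with rfl | hx'
              · exact h2
              · exact h2.trans (hpall x hx')
            simp [List.mem_cons, this.ne']
          rw [e1, e2, e3]
          simp
        · have heq : mp = mc := le_antisymm (not_lt.mp h2) (not_lt.mp h1)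
          subst heq
          rw [if_neg h1, if_neg h2]
          rw [ih (kp'.length + kc'.length) (by simp at hn ⊢; omega) kp' kc' _ rfl
              (List.Pairwise.of_cons hp) (List.Pairwise.of_cons hc)]
          have hpmem : ∀ x ∈ kp', x ∈ mp :: kc' ↔ x ∈ kc' := by
            intro x hx
            simp [List.mem_cons, (hpall x hx).ne']
          have hcmem : ∀ x ∈ kc', x ∈ mp :: kp' ↔ x ∈ kp' := by
            intro x hx
            simp [List.mem_cons, (hcall x hx).ne']
          have e1 : (mp :: kc').filter (fun m => !decide (m ∈ mp :: kp'))
              = kc'.filter (fun m => !decide (m ∈ kp')) := by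
            rw [List.filter_cons,
              if_neg (show ¬((!decide (mp ∈ mp :: kp')) = true) by simp)]
            apply List.filter_congr
            intro x hx
            have hxne : x ≠ mp := (hcall x hx).ne'
            simp [List.mem_cons, hxne]
          have e2 : (mp :: kp').filter (fun m => !decide (m ∈ mp :: kc'))
              = kp'.filter (fun m => !decide (m ∈ kc')) := by
            rw [List.filter_cons,
              if_neg (show ¬((!decide (mp ∈ mp :: kc')) = true) by simp)]
            apply List.filter_congr
            intro x hx
            have hxne : x ≠ mp := (hpall x hx).ne'
            simp [List.mem_cons, hxne]
          have e3 : (mp :: kp').filter (fun m => decide (m ∈ mp :: kc'))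
              = mp :: kp'.filter (fun m => decide (m ∈ kc')) := by
            rw [List.filter_cons,
              if_pos (show (decide (mp ∈ mp :: kc')) = true by simp)]
            congr 1
            apply List.filter_congr
            intro x hx
            have hxne : x ≠ mp := (hpall x hx).ne'
            simp [List.mem_cons, hxne]
          rw [e1, e2, e3]
          simp only [List.flatMap_cons]
          split_ifs with hr <;> simp

-- a foldl that appends one element unless a condition holds is a flatMap
theorem foldl_append_prop_unless {α β : Type} (l : List α) (p : α → Prop) [DecidablePred p] (f : α → β) :
    l.foldl (fun acc x => if p x then acc else acc ++ [f x]) [] =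
      l.flatMap (fun x => if p x then [] else [f x]) := by
  have hfun : (fun (acc : List β) x => if p x then acc else acc ++ [f x])
      = (fun acc x => acc ++ (if p x then [] else [f x])) := by
    funext acc x; split_ifs <;> simp
  rw [hfun, PySem.List.foldl_append_eq_flatMap]
  simp

-- ===== VERDICT =====
theorem diff_excluded_market_items_py_spec : Claim_equal_diff_excluded_market_items_py := by
  intro previous current _hDom _hPre
  unfold Spec_diff_excluded_market_items_py diff_excluded_market_items_py diff_excluded_market_items_py_alt
  dsimp only
  set pm := pvMarketMap previous with hpmdef
  set cm := pvMarketMap current with hcmdef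
  set kp := PySem.List.sorted pm.keys (fun x => x) false with hkpdef
  set kc := PySem.List.sorted cm.keys (fun x => x) false with hkcdef
  have hpnd : pm.keys.Nodup := nodup_keys_marketMap previous
  have hcnd : cm.keys.Nodup := nodup_keys_marketMap current
  have hkp : kp.Pairwise (· < ·) := pairwise_lt_sorted_keys previous
  have hkc : kc.Pairwise (· < ·) := pairwise_lt_sorted_keys current
  have hkpnd : kp.Nodup := (PySem.List.sorted_perm _ _ _).nodup_iff.mpr hpnd
  have hkcnd : kc.Nodup := (PySem.List.sorted_perm _ _ _).nodup_iff.mpr hcnd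
  have hkpm : ∀ m, m ∈ kp ↔ m ∈ pm.keys := fun m => PySem.List.mem_sorted _ _ _ _
  have hkcm : ∀ m, m ∈ kc ↔ m ∈ cm.keys := fun m => PySem.List.mem_sorted _ _ _ _
  have hadd : PySem.List.sorted (PySem.Set.diff cm.keys pm.keys) (fun x => x) false
      = kc.filter (fun m => !decide (m ∈ kp)) := by
    apply PySem.List.sorted_eq_of_perm_of_pairwise_lt
    · rw [List.perm_ext_iff_of_nodup (hkcnd.filter _) (PySem.Set.nodup_diff cm.keys pm.keys hcnd)]
      intro m
      simp only [List.mem_filter, PySem.Set.mem_diff, hkcm m, Bool.not_eq_eq_eq_not,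
        Bool.not_true, decide_eq_false_iff_not, hkpm m]
      try tauto
    · exact hkc.sublist List.filter_sublist
  have hrem : PySem.List.sorted (PySem.Set.diff pm.keys cm.keys) (fun x => x) false
      = kp.filter (fun m => !decide (m ∈ kc)) := by
    apply PySem.List.sorted_eq_of_perm_of_pairwise_lt
    · rw [List.perm_ext_iff_of_nodup (hkpnd.filter _) (PySem.Set.nodup_diff pm.keys cm.keys hpnd)]
      intro m
      simp only [List.mem_filter, PySem.Set.mem_diff, hkpm m, Bool.not_eq_eq_eq_not,
        Bool.not_true, decide_eq_false_iff_not, hkcm m]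
      try tauto
    · exact hkp.sublist List.filter_sublist
  have hint : PySem.List.sorted (PySem.Set.inter pm.keys cm.keys) (fun x => x) false
      = kp.filter (fun m => decide (m ∈ kc)) := by
    apply PySem.List.sorted_eq_of_perm_of_pairwise_lt
    · rw [List.perm_ext_iff_of_nodup (hkpnd.filter _) (PySem.Set.nodup_inter pm.keys cm.keys hpnd)]
      intro m
      simp only [List.mem_filter, PySem.Set.mem_inter, hkpm m, decide_eq_true_eq, hkcm m]
      try tauto
    · exact hkp.sublist List.filter_sublist
  rw [dedupSorted_eq previous, dedupSorted_eq current, ← hpmdef, ← hcmdef, ← hkpdef, ← hkcdef]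
  rw [mergeLoop_spec pm cm (kp.length + kc.length) kp kc ([], [], []) rfl hkp hkc]
  rw [hadd, hrem, hint]
  simp [foldl_append_prop_unless]
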